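-- pv_equiv track=rewrite | github.com/lomilomi304/typer | typer.py | wrap_text_preserve_chars
-- ===== SOURCE A (Python) =====
-- def wrap_text_preserve_chars(text, width):
--     """Wrap text at word boundaries without breaking words"""
--     if not text:
--         return []
--
--     lines = []
--     words = text.split(' ')
--     current_line = ""
--
--     for i, word in enumerate(words):
--         # Check if this is the first word on the line
--         if not current_line:
--             # Start a new line with this word
--             if len(word) <= width:
--                 current_line = word
--             else:
--                 # Word is too long, must break it
--                 while len(word) > width:
--                     lines.append(word[:width])
--                     word = word[width:]
--                 current_line = word
--         else:
--             # Try adding word with a space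
--             test_line = current_line + ' ' + word
--             if len(test_line) <= width:
--                 current_line = test_line
--             else:
--                 # Can't fit, save current line and start new one
--                 lines.append(current_line)
--                 if len(word) <= width:
--                     current_line = word
--                 else:
--                     # Word is too long, must break it
--                     while len(word) > width:
--                         lines.append(word[:width])
--                         word = word[width:]
--                     current_line = word
--
--     # Don't forget the last line
--     if current_line:
--         lines.append(current_line)
--
--     return lines
-- ===== SOURCE B (Python) =====
-- def wrap_text_preserve_chars(text, width):
--     """Wrap text at word boundaries without breaking words"""
--     if not text:
--         return []
--     # Phase 1: expand words into pieces of length <= width (overlong words are cut).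
--     pieces = []
--     for word in text.split(' '):
--         while len(word) > width:
--             pieces.append(word[:width])
--             word = word[width:]
--         pieces.append(word)
--     # Phase 2: greedy grouping of pieces; a line is only materialised when flushed.
--     lines = []
--     group = []   # pieces of the current line
--     glen = 0     # == len(' '.join(group))
--     for p in pieces:
--         if glen == 0:
--             group = [p]
--             glen = len(p)
--         elif glen + 1 + len(p) <= width:
--             group.append(p)
--             glen += 1 + len(p)
--         else:
--             lines.append(' '.join(group))
--             group = [p]
--             glen = len(p)
--     if glen:
--         lines.append(' '.join(group))
--     return lines
-- ===== Notes on version B (the rewrite author's own statement) =====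
-- stated objective: alternative
-- what changed: B is a two-phase algorithm: it first expands every word into chunks of length <= width, then greedily groups chunks into lists of pieces with a tracked joined length, materialising each line with ' '.join only at flush time, instead of A's single wrap loop over a string accumulator with an inline word-breaking while-loop duplicated in two branches.
import Mathlib
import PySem

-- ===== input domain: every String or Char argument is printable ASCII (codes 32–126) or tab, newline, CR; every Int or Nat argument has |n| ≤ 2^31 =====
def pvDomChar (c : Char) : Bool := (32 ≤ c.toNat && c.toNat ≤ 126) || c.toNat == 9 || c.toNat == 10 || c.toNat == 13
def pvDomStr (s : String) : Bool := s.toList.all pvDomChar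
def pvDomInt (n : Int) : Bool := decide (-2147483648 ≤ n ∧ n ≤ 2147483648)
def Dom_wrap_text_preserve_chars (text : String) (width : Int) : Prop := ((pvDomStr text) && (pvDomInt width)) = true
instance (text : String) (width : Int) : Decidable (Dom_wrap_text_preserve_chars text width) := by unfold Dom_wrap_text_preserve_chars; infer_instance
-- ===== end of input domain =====

-- B replaces A's single wrap loop (string accumulator with an inline word-breaking
-- while-loop duplicated in two branches) by a two-phase algorithm: expand words into
-- width-sized chunks, then greedily GROUP chunks into lists of pieces, joining a line
-- only when it is flushed; objective: simpler/alternative decomposition, equal output.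

-- ===== PORT A =====
-- A's inner `while len(word) > width` break loop.  The `1 ≤ width` guard only makes the
-- recursion total: for width ≤ 0 and a nonempty word Python A loops forever.
def pvBreakA (width : Int) (word : List Char) : List (List Char) × List Char :=
  if 1 ≤ width ∧ width < (word.length : Int) then
    (word.take width.toNat :: (pvBreakA width (word.drop width.toNat)).1,
     (pvBreakA width (word.drop width.toNat)).2)
  else ([], word)
termination_by word.length
decreasing_by simp; omega

-- one iteration of A's `for i, word in enumerate(words)` body; state = (lines, current_line)
def pvStepA (width : Int) : List (List Char) × List Char → List Char → List (List Char) × List Char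
  | (lines, current), word =>
    if current = [] then
      if (word.length : Int) ≤ width then (lines, word)
      else (lines ++ (pvBreakA width word).1, (pvBreakA width word).2)
    else
      if (((current ++ ' ' :: word).length : Int)) ≤ width then (lines, current ++ ' ' :: word)
      else
        if (word.length : Int) ≤ width then (lines ++ [current], word)
        else (lines ++ [current] ++ (pvBreakA width word).1, (pvBreakA width word).2)

def wrap_text_preserve_chars (text : String) (width : Int) : List String :=
  if text = "" then []
  else
    let words := PySem.Chars.splitOn text.toList [' ']
    let st := words.foldl (pvStepA width) ([], [])
    let lines := if st.2 = [] then st.1 else st.1 ++ [st.2]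
    lines.map String.ofList

-- ===== PORT B =====
-- phase 1 of B: one word's chunk list, each chunk ≤ width (same totality guard as pvBreakA)
def pvChunksB (width : Int) (word : List Char) : List (List Char) :=
  if 1 ≤ width ∧ width < (word.length : Int) then
    word.take width.toNat :: pvChunksB width (word.drop width.toNat)
  else [word]
termination_by word.length
decreasing_by simp; omega

-- phase 2 of B: state (lines, group, glen); group = pieces of the pending line,
-- glen = len(' '.join(group)); the join happens only when a line is flushed
def pvStepB (width : Int) :
    List (List Char) × List (List Char) × Int → List Char → List (List Char) × List (List Char) × Int
  | (lines, group, glen), p =>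
    if glen = 0 then (lines, [p], (p.length : Int))
    else if glen + 1 + (p.length : Int) ≤ width then
      (lines, group ++ [p], glen + 1 + (p.length : Int))
    else (lines ++ [List.intercalate [' '] group], [p], (p.length : Int))

def wrap_text_preserve_chars_alt (text : String) (width : Int) : List String :=
  if text = "" then []
  else
    let pieces := (PySem.Chars.splitOn text.toList [' ']).flatMap (pvChunksB width)
    let st := pieces.foldl (pvStepB width) ([], [], 0)
    let lines := if st.2.2 = 0 then st.1 else st.1 ++ [List.intercalate [' '] st.2.1]
    lines.map String.ofList

-- ===== PRECONDITION & SPEC =====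
def Spec_wrap_text_preserve_chars (text : String) (width : Int) (out : List String) : Prop := out = wrap_text_preserve_chars_alt text width
instance (text : String) (width : Int) (out : List String) : Decidable (Spec_wrap_text_preserve_chars text width out) := by unfold Spec_wrap_text_preserve_chars; infer_instance

-- ===== CLAIM (what is proved, stated in full; the proofs are below) =====
def Claim_equal_wrap_text_preserve_chars : Prop := ∀ (text : String) (width : Int), Dom_wrap_text_preserve_chars text width → Spec_wrap_text_preserve_chars text width (wrap_text_preserve_chars text width)

-- ===== LEMMAS AND PROOFS =====

-- ghost greedy step over (lines, current) used only in the proofs: the common abstraction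
-- of A's per-word step (via chunk expansion) and of B's grouped step (via joining)
def pvStepG (width : Int) : List (List Char) × List Char → List Char → List (List Char) × List Char
  | (lines, current), piece =>
    if current = [] then (lines, piece)
    else if (current.length : Int) + 1 + (piece.length : Int) ≤ width then
      (lines, current ++ ' ' :: piece)
    else (lines ++ [current], piece)

-- abstraction of B's state to the ghost state
def pvAbs (st : List (List Char) × List (List Char) × Int) : List (List Char) × List Char :=
  (st.1, List.intercalate [' '] st.2.1)

-- B's state invariant: glen is the length of the joined pending group
def pvInv (st : List (List Char) × List (List Char) × Int) : Prop :=
  st.2.2 = ((List.intercalate [' '] st.2.1).length : Int)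

lemma inter_nil : List.intercalate ([' '] : List Char) [] = [] := by
  simp [List.intercalate]

lemma inter_single (x : List Char) : List.intercalate ([' '] : List Char) [x] = x := by
  simp [List.intercalate]

lemma inter_append_last (g : List (List Char)) (p : List Char) (hg : g ≠ []) :
    List.intercalate [' '] (g ++ [p]) = List.intercalate [' '] g ++ ' ' :: p := by
  induction g with
  | nil => exact absurd rfl hg
  | cons a t ih =>
    cases t with
    | nil => simp [List.intercalate, List.intersperse]
    | cons b u =>
      have h1 : List.intercalate [' '] ((a :: b :: u) ++ [p]) =
          a ++ ' ' :: List.intercalate [' '] ((b :: u) ++ [p]) := by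
        simp [List.intercalate, List.intersperse]
      have h2 : List.intercalate [' '] (a :: b :: u) =
          a ++ ' ' :: List.intercalate [' '] (b :: u) := by
        simp [List.intercalate, List.intersperse]
      rw [h1, ih (by simp), h2]; simp

-- one-step simulation: B's grouped step tracks the ghost step and preserves the invariant
lemma stepB_sim (width : Int) (st : List (List Char) × List (List Char) × Int)
    (h : pvInv st) (p : List Char) :
    pvAbs (pvStepB width st p) = pvStepG width (pvAbs st) p ∧ pvInv (pvStepB width st p) := by
  obtain ⟨lines, group, glen⟩ := st
  have hgl : glen = ((List.intercalate [' '] group).length : Int) := h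
  by_cases h0 : glen = 0
  · have hcur : List.intercalate [' '] group = [] := by
      have : (List.intercalate [' '] group).length = 0 := by omega
      exact List.eq_nil_of_length_eq_zero this
    constructor
    · simp [pvStepB, pvStepG, pvAbs, h0, hcur, inter_single]
    · simp [pvStepB, pvInv, h0, inter_single]
  · have hcurne : List.intercalate [' '] group ≠ [] := by
      intro hc; rw [hc] at hgl; simp at hgl; omega
    have hgne : group ≠ [] := by
      intro hc; rw [hc, inter_nil] at hcurne; exact hcurne rfl
    by_cases hfit : glen + 1 + (p.length : Int) ≤ width
    · have hfit' : ((List.intercalate [' '] group).length : Int) + 1 + (p.length : Int) ≤ width := by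
        omega
      constructor
      · simp only [pvStepB, pvAbs, if_neg h0, if_pos hfit, pvStepG, if_neg hcurne, if_pos hfit']
        rw [inter_append_last group p hgne]
      · simp only [pvStepB, pvInv, if_neg h0, if_pos hfit]
        rw [inter_append_last group p hgne]; simp; omega
    · have hfit' : ¬ (((List.intercalate [' '] group).length : Int) + 1 + (p.length : Int) ≤ width) := by
        omega
      constructor
      · simp only [pvStepB, pvAbs, if_neg h0, if_neg hfit, pvStepG, if_neg hcurne, if_neg hfit']
        rw [inter_single]
      · simp only [pvStepB, pvInv, if_neg h0, if_neg hfit]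
        rw [inter_single]
  
-- fold simulation over any piece list
lemma foldB_sim (width : Int) (ps : List (List Char)) :
    ∀ st, pvInv st →
      pvAbs (ps.foldl (pvStepB width) st) = ps.foldl (pvStepG width) (pvAbs st) ∧
      pvInv (ps.foldl (pvStepB width) st) := by
  induction ps with
  | nil => intro st h; exact ⟨rfl, h⟩
  | cons p ps ih =>
    intro st h
    obtain ⟨h1, h2⟩ := stepB_sim width st h p
    obtain ⟨h3, h4⟩ := ih _ h2
    exact ⟨by rw [List.foldl_cons, List.foldl_cons, h3, h1], h4⟩

lemma pvBreakA_pos (width : Int) (word : List Char) (h : 1 ≤ width ∧ width < (word.length : Int)) :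
    pvBreakA width word = (word.take width.toNat :: (pvBreakA width (word.drop width.toNat)).1,
      (pvBreakA width (word.drop width.toNat)).2) := by
  rw [pvBreakA, if_pos h]

lemma pvBreakA_neg (width : Int) (word : List Char) (h : ¬ (1 ≤ width ∧ width < (word.length : Int))) :
    pvBreakA width word = ([], word) := by
  rw [pvBreakA, if_neg h]

lemma pvChunksB_pos (width : Int) (word : List Char) (h : 1 ≤ width ∧ width < (word.length : Int)) :
    pvChunksB width word = word.take width.toNat :: pvChunksB width (word.drop width.toNat) := by
  rw [pvChunksB, if_pos h]

lemma pvChunksB_neg (width : Int) (word : List Char) (h : ¬ (1 ≤ width ∧ width < (word.length : Int))) :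
    pvChunksB width word = [word] := by
  rw [pvChunksB, if_neg h]

lemma pvChunksB_ne_nil (width : Int) (word : List Char) : pvChunksB width word ≠ [] := by
  rw [pvChunksB]; split <;> simp

lemma pvChunksB_exists_cons (width : Int) (word : List Char) :
    ∃ p rest, pvChunksB width word = p :: rest := by
  rcases h : pvChunksB width word with _ | ⟨p, rest⟩
  · exact absurd h (pvChunksB_ne_nil _ _)
  · exact ⟨p, rest, rfl⟩

-- folding the ghost greedy step over the chunks of one word from an empty current line
-- reproduces A's break loop output
lemma foldG_break (width : Int) (word : List Char) :
    ∀ lines, (pvChunksB width word).foldl (pvStepG width) (lines, []) =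
      (lines ++ (pvBreakA width word).1, (pvBreakA width word).2) := by
  fun_induction pvChunksB width word with
  | case1 word h ih =>
    intro lines
    obtain ⟨p, rest, hc⟩ := pvChunksB_exists_cons width (word.drop width.toNat)
    have htake : ((word.take width.toNat).length : Int) = width := by
      simp [List.length_take]; omega
    have hne : word.take width.toNat ≠ [] := by
      intro hnil; rw [hnil] at htake; simp at htake; omega
    have h1 : pvStepG width (lines, []) (word.take width.toNat) = (lines, word.take width.toNat) := by
      simp [pvStepG]
    have h2 : pvStepG width (lines, word.take width.toNat) p = (lines ++ [word.take width.toNat], p) := by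
      simp only [pvStepG, if_neg hne, htake]
      rw [if_neg (by omega)]
    have h3 : pvStepG width (lines ++ [word.take width.toNat], []) p = (lines ++ [word.take width.toNat], p) := by
      simp [pvStepG]
    calc (word.take width.toNat :: pvChunksB width (word.drop width.toNat)).foldl (pvStepG width) (lines, [])
        = (pvChunksB width (word.drop width.toNat)).foldl (pvStepG width) (lines, word.take width.toNat) := by
          rw [List.foldl_cons, h1]
      _ = rest.foldl (pvStepG width) (lines ++ [word.take width.toNat], p) := by
          rw [hc, List.foldl_cons, h2]
      _ = (pvChunksB width (word.drop width.toNat)).foldl (pvStepG width) (lines ++ [word.take width.toNat], []) := by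
          rw [hc, List.foldl_cons, h3]
      _ = (lines ++ [word.take width.toNat] ++ (pvBreakA width (word.drop width.toNat)).1,
            (pvBreakA width (word.drop width.toNat)).2) := ih _
      _ = (lines ++ (pvBreakA width word).1, (pvBreakA width word).2) := by
          rw [pvBreakA_pos width word h]; simp
  | case2 word h =>
    intro lines
    rw [pvBreakA_neg width word h]
    simp [pvStepG]

-- from an empty current line, the ghost fold over one word's chunks = A's per-word step
lemma foldG_chunks_empty (width : Int) (word : List Char) (lines : List (List Char)) :
    (pvChunksB width word).foldl (pvStepG width) (lines, []) = pvStepA width (lines, []) word := by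
  by_cases hw : (word.length : Int) ≤ width
  · have hg : ¬ (1 ≤ width ∧ width < (word.length : Int)) := by omega
    rw [pvChunksB_neg width word hg]
    simp [pvStepA, pvStepG, hw]
  · by_cases h1 : 1 ≤ width
    · rw [foldG_break]
      simp [pvStepA, hw]
    · have hg : ¬ (1 ≤ width ∧ width < (word.length : Int)) := by omega
      rw [pvChunksB_neg width word hg]
      simp [pvStepA, pvStepG, hw, pvBreakA_neg width word hg]

-- A's per-word step = the ghost fold over that word's chunks, from ANY state
lemma stepA_eq_foldG (width : Int) (st : List (List Char) × List Char) (word : List Char) :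
    pvStepA width st word = (pvChunksB width word).foldl (pvStepG width) st := by
  obtain ⟨lines, current⟩ := st
  by_cases hc : current = []
  · subst hc; exact (foldG_chunks_empty width word lines).symm
  · have hcur1 : 1 ≤ (current.length : Int) := by
      have : current.length ≠ 0 := by simpa using hc
      omega
    by_cases hfit : (((current ++ ' ' :: word).length : Int)) ≤ width
    · have hlen : (current.length : Int) + 1 + (word.length : Int) ≤ width := by
        have := hfit; simp at this; omega
      have hg : ¬ (1 ≤ width ∧ width < (word.length : Int)) := by omega
      rw [pvChunksB_neg width word hg]
      simp only [pvStepA, pvStepG, if_neg hc, if_pos hfit, if_pos hlen, List.foldl_cons, List.foldl_nil]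
    · have hlen : ¬ ((current.length : Int) + 1 + (word.length : Int) ≤ width) := by
        intro hcon; apply hfit; simp; omega
      obtain ⟨p, rest, hch⟩ := pvChunksB_exists_cons width word
      have hp : ¬ ((current.length : Int) + 1 + (p.length : Int) ≤ width) := by
        by_cases hg : 1 ≤ width ∧ width < (word.length : Int)
        · rw [pvChunksB_pos width word hg] at hch
          have hpw : p = word.take width.toNat := by injection hch with e _; exact e.symm
          have : ((word.take width.toNat).length : Int) = width := by
            simp [List.length_take]; omega
          rw [hpw, this]; omega
        · rw [pvChunksB_neg width word hg] at hch
          have hpw : p = word := by injection hch with e _; exact e.symm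
          rw [hpw]; exact hlen
      have h2 : pvStepG width (lines, current) p = (lines ++ [current], p) := by
        simp only [pvStepG, if_neg hc, if_neg hp]
      have h3 : pvStepG width (lines ++ [current], []) p = (lines ++ [current], p) := by
        simp [pvStepG]
      have hstepA : pvStepA width (lines, current) word = pvStepA width (lines ++ [current], []) word := by
        simp only [pvStepA, if_neg hc, if_neg hfit]
        split_ifs <;> simp
      calc pvStepA width (lines, current) word
          = pvStepA width (lines ++ [current], []) word := hstepA
        _ = (pvChunksB width word).foldl (pvStepG width) (lines ++ [current], []) :=
            (foldG_chunks_empty width word (lines ++ [current])).symm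
        _ = rest.foldl (pvStepG width) (lines ++ [current], p) := by
            rw [hch, List.foldl_cons, h3]
        _ = (pvChunksB width word).foldl (pvStepG width) (lines, current) := by
            rw [hch, List.foldl_cons, h2]

-- A's whole loop = the ghost fold over the expanded piece list
lemma foldA_eq_foldG (width : Int) (words : List (List Char)) :
    ∀ st, words.foldl (pvStepA width) st =
      (words.flatMap (pvChunksB width)).foldl (pvStepG width) st := by
  induction words with
  | nil => intro st; rfl
  | cons w ws ih =>
    intro st
    rw [List.flatMap_cons, List.foldl_append, List.foldl_cons, stepA_eq_foldG, ih]

-- ===== VERDICT (by name: the statement is the Claim_ definition above) =====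
theorem wrap_text_preserve_chars_spec : Claim_equal_wrap_text_preserve_chars := by
  intro text width _
  unfold Spec_wrap_text_preserve_chars wrap_text_preserve_chars wrap_text_preserve_chars_alt
  by_cases h : text = ""
  · simp [h]
  · simp only [h]
    rw [foldA_eq_foldG]
    set pieces := (PySem.Chars.splitOn text.toList [' ']).flatMap (pvChunksB width) with hp
    have hinv0 : pvInv ([], [], 0) := by simp [pvInv, inter_nil]
    obtain ⟨habs, hinv⟩ := foldB_sim width pieces ([], [], 0) hinv0
    have habs0 : pvAbs ([], [], 0) = (([] : List (List Char)), ([] : List Char)) := by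
      simp [pvAbs, inter_nil]
    rw [habs0] at habs
    set stB := pieces.foldl (pvStepB width) ([], [], 0) with hst
    have h1 : pieces.foldl (pvStepG width) ([], []) = (stB.1, List.intercalate [' '] stB.2.1) := by
      rw [← habs]; rfl
    rw [h1]
    have hzero : stB.2.2 = 0 ↔ List.intercalate [' '] stB.2.1 = [] := by
      constructor
      · intro h0
        have : (List.intercalate [' '] stB.2.1).length = 0 := by
          have := hinv; unfold pvInv at this; omega
        exact List.eq_nil_of_length_eq_zero this
      · intro h0; have := hinv; unfold pvInv at this; rw [h0] at this; simpa using this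
    by_cases hz : stB.2.2 = 0
    · simp [hz, hzero.mp hz]
    · have : ¬ (List.intercalate [' '] stB.2.1 = []) := fun hc => hz (hzero.mpr hc)
      simp [hz, this]
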